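-- pv_equiv track=rewrite | github.com/mamarcus64/CrossNews | src/data_preprocessing/pair_generation.py | stack_documents
-- ===== SOURCE A (Python) =====
-- import copy
--
-- def stack_documents(authors, min_char_threshold, upper_char_limit=3000, is_train=False):
--     """
--     Adds documents of a single genre until a certain minimum character threshold
--     is reached, then returns the stacked documents. For training, splits large
--     documents into multiple disjoint documents.
--     """
--     authors = copy.deepcopy(authors)
--     new_authors = {author: [] for author in authors.keys()}
--     for author, old_docs in authors.items():
--         articles = [doc for doc in old_docs if doc['genre'] == 'Article']
--         tweets = [doc for doc in old_docs if doc['genre'] == 'Tweet']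
--
--         for docs in [articles, tweets]:
--             docs = sorted(docs, key=lambda x: len(x['text']), reverse=True)
--             new_doc = None
--             for doc in docs:
--                 if new_doc is None:
--                     new_doc = doc
--                 else:
--                     new_doc['text'] += f' <new> {doc["text"]}'
--                 if len(new_doc['text']) >= min_char_threshold:
--                     text = new_doc['text']
--                     # if training data, can split long data into multiple upper_char_limit-sized documents
--                     for i in range(0, max(len(text) // upper_char_limit, 1) if is_train else 1):
--                         new_doc['text'] = text[upper_char_limit*i:upper_char_limit*(i+1)]
--                         if len(new_doc['text']) >= min_char_threshold:
--                             new_authors[author].append(copy.deepcopy(new_doc))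
--                     new_doc = None
--     return new_authors
-- ===== SOURCE B (Python) =====
-- SEP = ' <new> '
--
--
-- def _first_geq(q, target, lo):
--     """Smallest index i in [lo, len(q)) with q[i] >= target, else len(q) (binary search)."""
--     hi = len(q)
--     while lo < hi:
--         mid = (lo + hi) // 2
--         if q[mid] < target:
--             lo = mid + 1
--         else:
--             hi = mid
--     return lo
--
--
-- def _boundaries(lengths, mct):
--     """Cut points [a, b) of the stacks, found numerically on prefix sums.
--
--     q[i] = len(SEP.join of the first i texts) + len(SEP); q is strictly increasing,
--     so the first completion point of each stack is found by binary search.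
--     A trailing range that never reaches the threshold yields no cut (discarded).
--     """
--     q = [0]
--     for L in lengths:
--         q.append(q[-1] + L + len(SEP))
--     cuts, a, n = [], 0, len(lengths)
--     while a < n:
--         b = _first_geq(q, q[a] + len(SEP) + mct, a + 1)
--         if b > n:
--             break
--         cuts.append((a, b))
--         a = b
--     return cuts
--
--
-- def stack_documents(authors, min_char_threshold, upper_char_limit=3000, is_train=False):
--     new_authors = {author: [] for author in authors}
--     for author, old_docs in authors.items():
--         out = []
--         for genre in ('Article', 'Tweet'):
--             group = sorted([d for d in old_docs if d['genre'] == genre],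
--                            key=lambda d: len(d['text']), reverse=True)
--             texts = [d['text'] for d in group]
--             for a, b in _boundaries([len(t) for t in texts], min_char_threshold):
--                 text = SEP.join(texts[a:b])
--                 n_chunks = max(len(text) // upper_char_limit, 1) if is_train else 1
--                 for i in range(n_chunks):
--                     chunk = text[upper_char_limit * i:upper_char_limit * (i + 1)]
--                     if len(chunk) >= min_char_threshold:
--                         doc = dict(group[a])
--                         doc['text'] = chunk
--                         out.append(doc)
--         new_authors[author] = out
--     return new_authors
-- ===== Notes on version B (the rewrite author's own statement) =====
-- stated objective: alternative
-- what changed: B replaces A's greedy mutate-and-append string accumulation with a numeric algorithm: it builds a prefix-sum array of the sorted text lengths (plus separator length), finds each stack's completion point by binary search on that strictly increasing array, then materialises each stack once with a single join of the slice and chunks it; no running document is ever mutated.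
-- outside the precondition, e.g. on stack_documents({'a': []}, 5, 0, True): A returns {'a': []}, B returns {'a': []}; on stack_documents({'a': [{'genre': 'Tweet'}]}, 1, 10, False): A raises KeyError, B raises KeyError
import Mathlib
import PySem

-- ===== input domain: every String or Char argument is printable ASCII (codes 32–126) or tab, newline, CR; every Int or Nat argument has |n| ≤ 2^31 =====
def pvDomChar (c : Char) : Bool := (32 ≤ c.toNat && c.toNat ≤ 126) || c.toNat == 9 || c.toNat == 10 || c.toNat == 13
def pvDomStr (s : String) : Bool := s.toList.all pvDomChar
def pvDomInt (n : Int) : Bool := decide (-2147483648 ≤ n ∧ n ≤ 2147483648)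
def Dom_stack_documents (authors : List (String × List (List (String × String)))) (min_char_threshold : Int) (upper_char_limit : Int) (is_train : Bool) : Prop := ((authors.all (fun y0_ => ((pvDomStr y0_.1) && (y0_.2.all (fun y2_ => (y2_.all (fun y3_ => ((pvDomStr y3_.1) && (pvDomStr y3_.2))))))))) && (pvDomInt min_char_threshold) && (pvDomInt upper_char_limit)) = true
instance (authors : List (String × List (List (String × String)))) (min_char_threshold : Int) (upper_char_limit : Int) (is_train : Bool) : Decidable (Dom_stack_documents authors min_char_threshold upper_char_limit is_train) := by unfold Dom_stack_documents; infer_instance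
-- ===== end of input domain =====

-- B replaces A's greedy mutate-and-append string stacking with a numeric algorithm:
-- prefix sums of the text lengths, each stack's completion point found by binary
-- search on that strictly increasing array, then one join per stack; alternative
-- structure of the same cost.  A deep-copies its argument, so neither program
-- mutates the caller's data.

abbrev PvDoc : Type := List (String × String)
abbrev PvAD : Type := PySem.Dict String (List PvDoc)

-- doc[k] as a first-match lookup (total form; Pre_ guarantees the key is present wherever read)
def pvGetS (d : PvDoc) (k : String) : String := (PySem.Dict.mk d).getD k ""
-- doc['text'] = t (overwrite keeps the key's position; appends if absent)
def pvSetText (d : PvDoc) (t : String) : PvDoc := ((PySem.Dict.mk d).insert "text" t).items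

-- ===== PORT A =====
-- body of A's inner chunk-splitting loop (state: new_doc, the new_authors dict)
def pvStepChunkA (min_char_threshold upper_char_limit : Int) (author : String) (text : String)
    (st2 : PvDoc × PvAD) (i : Int) : PvDoc × PvAD :=
  let nd := pvSetText st2.1 (PySem.Str.slice text (some (upper_char_limit * i)) (some (upper_char_limit * (i + 1))))
  if min_char_threshold ≤ PySem.Str.len (pvGetS nd "text") then
    (nd, st2.2.modify author [] (fun l => l ++ [nd]))
  else (nd, st2.2)

-- body of A's 'for doc in docs' loop (state: the pending new_doc, the new_authors dict)
def pvStepDocA (min_char_threshold upper_char_limit : Int) (is_train : Bool) (author : String)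
    (st : Option PvDoc × PvAD) (doc : PvDoc) : Option PvDoc × PvAD :=
  let new_doc : PvDoc :=
    match st.1 with
    | none => doc
    | some nd => pvSetText nd (pvGetS nd "text" ++ " <new> " ++ pvGetS doc "text")
  if min_char_threshold ≤ PySem.Str.len (pvGetS new_doc "text") then
    let text := pvGetS new_doc "text"
    let fin :=
      (PySem.List.pyRange 0 (if is_train then max (PySem.Int.floordiv (PySem.Str.len text) upper_char_limit) 1 else 1) 1).foldl
        (pvStepChunkA min_char_threshold upper_char_limit author text) (new_doc, st.2)
    (none, fin.2)
  else (some new_doc, st.2)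

def stack_documents (authors : List (String × List (List (String × String)))) (min_char_threshold : Int) (upper_char_limit : Int) (is_train : Bool) : List (String × List (List (String × String))) :=
  (authors.foldl
    (fun (na : PvAD) p =>
      let articles := p.2.filter (fun doc => pvGetS doc "genre" == "Article")
      let tweets := p.2.filter (fun doc => pvGetS doc "genre" == "Tweet")
      [articles, tweets].foldl
        (fun (na : PvAD) docs0 =>
          let docs := PySem.List.sorted docs0 (fun x => PySem.Str.len (pvGetS x "text")) true
          (docs.foldl (pvStepDocA min_char_threshold upper_char_limit is_train p.1)
            ((none : Option PvDoc), na)).2)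
        na)
    (PySem.Dict.ofList (authors.map (fun p => (p.1, ([] : List PvDoc)))))).items

-- ===== PORT B =====
-- B's _first_geq: smallest index in [lo, hi) with q[index] >= target, else hi (binary search).
-- The while loop halves the span, so span-many steps always suffice: the fuel argument is a
-- pure totality guard (it never runs out on the wrapper's call), not part of the algorithm.
-- Called with hi = len(q), every probed index is in range, so getD is exact.
def pvFirstGeqAux (q : List Int) (target : Int) : Nat → Nat → Nat → Nat
  | 0, lo, _ => lo
  | fuel + 1, lo, hi =>
    if lo < hi then
      -- mid = (lo + hi) // 2, inlined
      if PySem.List.pyGetD q (((lo + hi) / 2 : Nat) : Int) 0 < target then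
        pvFirstGeqAux q target fuel ((lo + hi) / 2 + 1) hi
      else pvFirstGeqAux q target fuel lo ((lo + hi) / 2)
    else lo

def pvFirstGeq (q : List Int) (target : Int) (lo hi : Nat) : Nat :=
  pvFirstGeqAux q target (hi - lo) lo hi

-- B's while loop over cut points: emit (a, b) for each completed stack, stop when the
-- binary search runs past n (the trailing partial stack).  Each step advances a to b > a,
-- so n - a steps always suffice: the fuel argument is again only a totality guard.
def pvCutsAux (q : List Int) (mct : Int) (n : Nat) : Nat → Nat → List (Nat × Nat)
  | 0, _ => []
  | fuel + 1, a =>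
    if a < n then
      if pvFirstGeq q (PySem.List.pyGetD q (a : Int) 0 + 7 + mct) (a + 1) q.length ≤ n then
        (a, pvFirstGeq q (PySem.List.pyGetD q (a : Int) 0 + 7 + mct) (a + 1) q.length) ::
          pvCutsAux q mct n fuel (pvFirstGeq q (PySem.List.pyGetD q (a : Int) 0 + 7 + mct) (a + 1) q.length)
      else []
    else []

def pvCutsB (q : List Int) (mct : Int) (n : Nat) (a : Nat) : List (Nat × Nat) :=
  pvCutsAux q mct n (n - a) a

def stack_documents_alt (authors : List (String × List (List (String × String)))) (min_char_threshold : Int) (upper_char_limit : Int) (is_train : Bool) : List (String × List (List (String × String))) :=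
  (authors.foldl
    (fun (na : PvAD) p =>
      let out := ["Article", "Tweet"].foldl
        (fun (out : List PvDoc) genre =>
          let group := PySem.List.sorted (p.2.filter (fun d => pvGetS d "genre" == genre))
            (fun d => PySem.Str.len (pvGetS d "text")) true
          let texts := group.map (fun d => pvGetS d "text")
          let lens := texts.map (fun t => PySem.Str.len t)
          -- q = [0]; for L in lengths: q.append(q[-1] + L + len(SEP))   (len(' <new> ') = 7)
          let q := lens.foldl (fun q L => q ++ [PySem.List.pyGetD q (-1) 0 + L + 7]) [(0 : Int)]
          (pvCutsB q min_char_threshold texts.length 0).foldl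
            (fun (out : List PvDoc) ab =>
              let text := PySem.Str.join " <new> " (PySem.List.slice texts (some (ab.1 : Int)) (some (ab.2 : Int)))
              let n_chunks : Int := if is_train then max (PySem.Int.floordiv (PySem.Str.len text) upper_char_limit) 1 else 1
              (PySem.List.pyRange 0 n_chunks 1).foldl
                (fun (out : List PvDoc) i =>
                  let chunk := PySem.Str.slice text (some (upper_char_limit * i)) (some (upper_char_limit * (i + 1)))
                  if min_char_threshold ≤ PySem.Str.len chunk then
                    out ++ [pvSetText (PySem.List.pyGetD group (ab.1 : Int) []) chunk]
                  else out)
                out)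
            out)
        []
      na.insert p.1 out)
    (PySem.Dict.ofList (authors.map (fun p => (p.1, ([] : List PvDoc)))))).items

-- ===== PRECONDITION & SPEC =====
-- Pre_ excludes exactly: inputs where Python A raises (a doc missing the 'genre' key, an
-- Article/Tweet doc missing the 'text' key — KeyError), association lists with duplicate
-- author keys or duplicate doc keys, which a Python dict cannot represent (the dict collapse
-- there is accidental), and is_train with upper_char_limit = 0, on which A raises
-- ZeroDivisionError as soon as any stack completes (A returns only in the degenerate case
-- where no stack ever completes).
def Pre_stack_documents (authors : List (String × List (List (String × String)))) (min_char_threshold : Int) (upper_char_limit : Int) (is_train : Bool) : Prop :=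
  (authors.map Prod.fst).Nodup ∧
  (∀ p ∈ authors, ∀ d ∈ p.2,
    (d.map Prod.fst).Nodup ∧ "genre" ∈ d.map Prod.fst ∧
    ((pvGetS d "genre" = "Article" ∨ pvGetS d "genre" = "Tweet") → "text" ∈ d.map Prod.fst)) ∧
  (is_train = true → upper_char_limit ≠ 0)
instance (authors : List (String × List (List (String × String)))) (min_char_threshold : Int) (upper_char_limit : Int) (is_train : Bool) : Decidable (Pre_stack_documents authors min_char_threshold upper_char_limit is_train) := by unfold Pre_stack_documents; infer_instance

def pvWitness_stack_documents : (List (String × List (List (String × String)))) × Int × Int × Bool :=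
  ([("alice", [[("genre", "Article"), ("text", "abcdef")], [("genre", "Tweet"), ("text", "hi")]])], 3, 4, true)

def Spec_stack_documents (authors : List (String × List (List (String × String)))) (min_char_threshold : Int) (upper_char_limit : Int) (is_train : Bool) (out : List (String × List (List (String × String)))) : Prop := out = stack_documents_alt authors min_char_threshold upper_char_limit is_train
instance (authors : List (String × List (List (String × String)))) (min_char_threshold : Int) (upper_char_limit : Int) (is_train : Bool) (out : List (String × List (List (String × String)))) : Decidable (Spec_stack_documents authors min_char_threshold upper_char_limit is_train out) := by unfold Spec_stack_documents; infer_instance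

-- ===== CLAIM (what is proved, stated in full; the proofs are below) =====
def Claim_equal_stack_documents : Prop := ∀ (authors : List (String × List (List (String × String)))) (min_char_threshold : Int) (upper_char_limit : Int) (is_train : Bool), Dom_stack_documents authors min_char_threshold upper_char_limit is_train → Pre_stack_documents authors min_char_threshold upper_char_limit is_train → Spec_stack_documents authors min_char_threshold upper_char_limit is_train (stack_documents authors min_char_threshold upper_char_limit is_train)

-- ===== LEMMAS AND PROOFS =====

-- ---- generic dict plumbing (shared) ----
theorem pv_get_set (d : PvDoc) (t : String) : pvGetS (pvSetText d t) "text" = t := by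
  show (PySem.Dict.mk ((PySem.Dict.mk d).insert "text" t).items).getD "text" "" = t
  exact PySem.Dict.getD_insert_self _ _ _ _

theorem pv_map_id {α : Type} (l : List α) (f : α → α) (h : ∀ p ∈ l, f p = p) : l.map f = l := by
  induction l with
  | nil => rfl
  | cons x xs ih =>
    simp only [List.map_cons, h x (by simp)]
    rw [ih (fun p hp => h p (List.mem_cons_of_mem _ hp))]

theorem pv_insert_insert {κ ν : Type} [BEq κ] [LawfulBEq κ] (d : PySem.Dict κ ν) (k : κ) (v w : ν) :
    (d.insert k v).insert k w = d.insert k w := by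
  have hc2 : (d.insert k v).contains k = true := PySem.Dict.contains_insert_self d k v
  by_cases hc : d.contains k = true
  · have h1 : d.insert k v = PySem.Dict.mk (d.items.map (fun p => if (p.1 == k) = true then (k, v) else p)) := by
      simp [PySem.Dict.insert, hc]
    have h2 : d.insert k w = PySem.Dict.mk (d.items.map (fun p => if (p.1 == k) = true then (k, w) else p)) := by
      simp [PySem.Dict.insert, hc]
    rw [h1] at hc2
    have h3 : (PySem.Dict.mk (d.items.map (fun p => if (p.1 == k) = true then (k, v) else p))).insert k w
        = PySem.Dict.mk ((d.items.map (fun p => if (p.1 == k) = true then (k, v) else p)).map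
            (fun p => if (p.1 == k) = true then (k, w) else p)) := by
      simp [PySem.Dict.insert, hc2]
    rw [h1, h3, h2]
    congr 1
    rw [List.map_map]
    apply List.map_congr_left
    intro p _
    by_cases hp : (p.1 == k) = true
    · simp [hp]
    · simp [hp]
  · have hcf : d.contains k = false := by revert hc; cases d.contains k <;> simp
    have h1 : d.insert k v = PySem.Dict.mk (d.items ++ [(k, v)]) := by
      simp [PySem.Dict.insert, hcf]
    have h2 : d.insert k w = PySem.Dict.mk (d.items ++ [(k, w)]) := by
      simp [PySem.Dict.insert, hcf]
    rw [h1] at hc2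
    have h3 : (PySem.Dict.mk (d.items ++ [(k, v)])).insert k w
        = PySem.Dict.mk ((d.items ++ [(k, v)]).map (fun p => if (p.1 == k) = true then (k, w) else p)) := by
      simp [PySem.Dict.insert, hc2]
    rw [h1, h3, h2]
    congr 1
    rw [List.map_append]
    have hmap : d.items.map (fun p => if (p.1 == k) = true then (k, w) else p) = d.items := by
      apply pv_map_id
      intro p hp
      have hk : (p.1 == k) = false := by
        by_contra hne
        have hkt : (p.1 == k) = true := by revert hne; cases (p.1 == k) <;> simp
        have : d.items.any (fun p => p.1 == k) = true := by
          rw [List.any_eq_true]; exact ⟨p, hp, hkt⟩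
        rw [show d.contains k = d.items.any (fun p => p.1 == k) from rfl] at hcf
        rw [this] at hcf; cases hcf
      simp [hk]
    simp [hmap]

theorem pv_set_set (d : PvDoc) (t t' : String) : pvSetText (pvSetText d t) t' = pvSetText d t' := by
  show ((PySem.Dict.mk ((PySem.Dict.mk d).insert "text" t).items).insert "text" t').items = _
  rw [show PySem.Dict.mk ((PySem.Dict.mk d).insert "text" t).items = (PySem.Dict.mk d).insert "text" t from rfl]
  rw [pv_insert_insert]
  rfl

theorem pv_get?_middle (pre post : List (String × List PvDoc)) (a : String) (v : List PvDoc)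
    (hpre : a ∉ pre.map Prod.fst) :
    (PySem.Dict.mk (pre ++ (a, v) :: post)).get? a = some v := by
  induction pre with
  | nil => simp [PySem.Dict.get?_mk_cons]
  | cons p pre ih =>
    simp only [List.map_cons, List.mem_cons, not_or] at hpre
    rw [List.cons_append, PySem.Dict.get?_mk_cons]
    have : (p.1 == a) = false := by rw [beq_eq_false_iff_ne]; exact fun h => hpre.1 h.symm
    simp only [this, Bool.false_eq_true, if_false]
    exact ih hpre.2

theorem pv_insert_middle (pre post : List (String × List PvDoc)) (a : String) (v w : List PvDoc)
    (hpre : a ∉ pre.map Prod.fst) (hpost : a ∉ post.map Prod.fst) :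
    (PySem.Dict.mk (pre ++ (a, v) :: post)).insert a w = PySem.Dict.mk (pre ++ (a, w) :: post) := by
  have hc : (PySem.Dict.mk (pre ++ (a, v) :: post)).contains a = true := by
    simp [PySem.Dict.contains]
  simp only [PySem.Dict.insert, hc, if_true]
  congr 1
  rw [List.map_append, List.map_cons]
  have hpre' : pre.map (fun p => if (p.1 == a) = true then (a, w) else p) = pre := by
    apply pv_map_id
    intro p hp
    have hk : (p.1 == a) = false := by
      rw [beq_eq_false_iff_ne]
      intro heq
      exact hpre (heq ▸ List.mem_map_of_mem hp)
    simp [hk]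
  have hpost' : post.map (fun p => if (p.1 == a) = true then (a, w) else p) = post := by
    apply pv_map_id
    intro p hp
    have hk : (p.1 == a) = false := by
      rw [beq_eq_false_iff_ne]
      intro heq
      exact hpost (heq ▸ List.mem_map_of_mem hp)
    simp [hk]
  rw [hpre', hpost']
  simp

theorem pv_modify_middle (pre post : List (String × List PvDoc)) (a : String) (v : List PvDoc)
    (g : List PvDoc → List PvDoc) (hpre : a ∉ pre.map Prod.fst) (hpost : a ∉ post.map Prod.fst) :
    (PySem.Dict.mk (pre ++ (a, v) :: post)).modify a [] g = PySem.Dict.mk (pre ++ (a, g v) :: post) := by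
  unfold PySem.Dict.modify PySem.Dict.getD
  rw [pv_get?_middle pre post a v hpre]
  exact pv_insert_middle pre post a v (g v) hpre hpost

-- ---- shared closed forms ----
-- the completed chunks of one stacked text (closed filter/map form of both chunk loops)
def pvChunks (mct uct : Int) (tr : Bool) (rep : PvDoc) (text : String) : List PvDoc :=
  ((PySem.List.pyRange 0 (if tr then max (PySem.Int.floordiv (PySem.Str.len text) uct) 1 else 1) 1).filter
      (fun i => decide (mct ≤ PySem.Str.len (PySem.Str.slice text (some (uct * i)) (some (uct * (i + 1))))))).map
    (fun i => pvSetText rep (PySem.Str.slice text (some (uct * i)) (some (uct * (i + 1)))))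

theorem pv_chunks_congr (mct uct : Int) (tr : Bool) (nd rep : PvDoc) (text : String)
    (h : ∀ t, pvSetText nd t = pvSetText rep t) :
    pvChunks mct uct tr nd text = pvChunks mct uct tr rep text := by
  simp only [pvChunks]
  apply List.map_congr_left
  intro i _
  exact h _

-- pure recursion computing the docs A's inline loop emits for one sorted group
def pvEmit (mct uct : Int) (tr : Bool) : Option PvDoc → List PvDoc → List PvDoc
  | _, [] => []
  | nd?, d :: ds =>
    let nd : PvDoc := match nd? with
      | none => d
      | some n => pvSetText n (pvGetS n "text" ++ " <new> " ++ pvGetS d "text")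
    if mct ≤ PySem.Str.len (pvGetS nd "text") then
      pvChunks mct uct tr nd (pvGetS nd "text") ++ pvEmit mct uct tr none ds
    else pvEmit mct uct tr (some nd) ds

-- ---- A side: the port's folds compute pvEmit ----
theorem pv_stepchunkA_eval (mct uct : Int) (a : String) (text : String) (cur : PvDoc) (D : PvAD) (i : Int) :
    pvStepChunkA mct uct a text (cur, D) i =
      if mct ≤ PySem.Str.len (PySem.Str.slice text (some (uct * i)) (some (uct * (i + 1)))) then
        (pvSetText cur (PySem.Str.slice text (some (uct * i)) (some (uct * (i + 1)))),
         D.modify a [] (fun l => l ++ [pvSetText cur (PySem.Str.slice text (some (uct * i)) (some (uct * (i + 1))))]))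
      else (pvSetText cur (PySem.Str.slice text (some (uct * i)) (some (uct * (i + 1)))), D) := by
  simp only [pvStepChunkA, pv_get_set]

theorem pv_chunkfold_A (mct uct : Int) (a : String) (pre post : List (String × List PvDoc))
    (hpre : a ∉ pre.map Prod.fst) (hpost : a ∉ post.map Prod.fst) (nd : PvDoc) (text : String) :
    ∀ (l : List Int) (cur : PvDoc) (v : List PvDoc), (∀ t, pvSetText cur t = pvSetText nd t) →
    (l.foldl (pvStepChunkA mct uct a text) (cur, PySem.Dict.mk (pre ++ (a, v) :: post))).2
    = PySem.Dict.mk (pre ++ (a, v ++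
        (l.filter (fun i => decide (mct ≤ PySem.Str.len (PySem.Str.slice text (some (uct * i)) (some (uct * (i + 1))))))).map
          (fun i => pvSetText nd (PySem.Str.slice text (some (uct * i)) (some (uct * (i + 1)))))) :: post) := by
  intro l
  induction l with
  | nil => intro cur v hcur; simp
  | cons i l ih =>
    intro cur v hcur
    rw [List.foldl_cons, pv_stepchunkA_eval]
    have hcur' : ∀ t, pvSetText (pvSetText cur (PySem.Str.slice text (some (uct * i)) (some (uct * (i + 1))))) t
        = pvSetText nd t := by
      intro t; rw [pv_set_set]; exact hcur t
    by_cases hlen : mct ≤ PySem.Str.len (PySem.Str.slice text (some (uct * i)) (some (uct * (i + 1))))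
    · rw [if_pos hlen]
      rw [pv_modify_middle pre post a v _ hpre hpost]
      rw [ih _ _ hcur']
      rw [hcur]
      rw [List.filter_cons_of_pos (by simpa using hlen), List.map_cons]
      simp [List.append_assoc]
    · rw [if_neg hlen]
      rw [ih _ _ hcur']
      rw [List.filter_cons_of_neg (by simpa using hlen)]

theorem pv_groupfold_A (mct uct : Int) (tr : Bool) (a : String) (pre post : List (String × List PvDoc))
    (hpre : a ∉ pre.map Prod.fst) (hpost : a ∉ post.map Prod.fst) :
    ∀ (ds : List PvDoc) (nd? : Option PvDoc) (v : List PvDoc),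
    (ds.foldl (pvStepDocA mct uct tr a) (nd?, PySem.Dict.mk (pre ++ (a, v) :: post))).2
      = PySem.Dict.mk (pre ++ (a, v ++ pvEmit mct uct tr nd? ds) :: post) := by
  intro ds
  induction ds with
  | nil => intro nd? v; simp [pvEmit]
  | cons d ds ih =>
    intro nd? v
    rw [List.foldl_cons]
    cases nd? with
    | none =>
      by_cases hlen : mct ≤ PySem.Str.len (pvGetS d "text")
      · have hstep : pvStepDocA mct uct tr a (none, PySem.Dict.mk (pre ++ (a, v) :: post)) d
            = (none, PySem.Dict.mk (pre ++ (a, v ++ pvChunks mct uct tr d (pvGetS d "text")) :: post)) := by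
          simp only [pvStepDocA, if_pos hlen]
          rw [pv_chunkfold_A mct uct a pre post hpre hpost d (pvGetS d "text") _ d v (fun t => rfl)]
          rfl
        rw [hstep, ih]
        simp only [pvEmit, if_pos hlen, List.append_assoc]
      · have hstep : pvStepDocA mct uct tr a (none, PySem.Dict.mk (pre ++ (a, v) :: post)) d
            = (some d, PySem.Dict.mk (pre ++ (a, v) :: post)) := by
          simp only [pvStepDocA, if_neg hlen]
        rw [hstep, ih]
        simp only [pvEmit, if_neg hlen]
    | some n =>
      by_cases hlen : mct ≤ PySem.Str.len (pvGetS (pvSetText n (pvGetS n "text" ++ " <new> " ++ pvGetS d "text")) "text")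
      · have hstep : pvStepDocA mct uct tr a (some n, PySem.Dict.mk (pre ++ (a, v) :: post)) d
            = (none, PySem.Dict.mk (pre ++ (a, v ++ pvChunks mct uct tr
                (pvSetText n (pvGetS n "text" ++ " <new> " ++ pvGetS d "text"))
                (pvGetS (pvSetText n (pvGetS n "text" ++ " <new> " ++ pvGetS d "text")) "text")) :: post)) := by
          simp only [pvStepDocA, if_pos hlen]
          rw [pv_chunkfold_A mct uct a pre post hpre hpost _ _ _ _ v (fun t => rfl)]
          rfl
        rw [hstep, ih]
        simp only [pvEmit, if_pos hlen, List.append_assoc]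
      · have hstep : pvStepDocA mct uct tr a (some n, PySem.Dict.mk (pre ++ (a, v) :: post)) d
            = (some (pvSetText n (pvGetS n "text" ++ " <new> " ++ pvGetS d "text")), PySem.Dict.mk (pre ++ (a, v) :: post)) := by
          simp only [pvStepDocA, if_neg hlen]
        rw [hstep, ih]
        simp only [pvEmit, if_neg hlen]

-- ---- numeric spec: prefix sums, join, segments ----
def pvTextOf (d : PvDoc) : String := pvGetS d "text"

-- S i = q[i]: joined length of the first i texts plus one trailing separator
def pvS (lens : List Int) (i : Nat) : Int := (lens.take i).sum + 7 * (i : Int)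

def pvJoin (l : List String) : String := PySem.Str.join " <new> " l

def pvSeg (texts : List String) (a b : Nat) : String := pvJoin ((texts.drop a).take (b - a))

-- the greedy linear-scan segmentation (reference form of A's stacking)
def pvSegsL (lens : List Int) (mct : Int) (a0 k : Nat) : List (Nat × Nat) :=
  if h : k < lens.length then
    if mct + pvS lens a0 + 7 ≤ pvS lens (k + 1) then (a0, k + 1) :: pvSegsL lens mct (k + 1) (k + 1)
    else pvSegsL lens mct a0 (k + 1)
  else []
termination_by lens.length - k

-- the output docs of one segment
def pvF (mct uct : Int) (tr : Bool) (docs : List PvDoc) (ab : Nat × Nat) : List PvDoc :=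
  pvChunks mct uct tr (docs.getD ab.1 []) (pvSeg (docs.map pvTextOf) ab.1 ab.2)

theorem pv_len_nonneg (s : String) : 0 ≤ PySem.Str.len s := by
  rw [PySem.Str.len_eq]; exact Int.natCast_nonneg _

-- length of a nonempty join (character count; separator has 7 characters)
theorem pv_cjoin_len (sep : List Char) : ∀ (ps : List (List Char)), ps ≠ [] →
    (PySem.Chars.join sep ps).length = (ps.map List.length).sum + sep.length * (ps.length - 1) := by
  intro ps
  induction ps with
  | nil => intro h; exact absurd rfl h
  | cons p ps ih =>
    intro _
    cases ps with
    | nil => simp [PySem.Chars.join_singleton]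
    | cons p' rest =>
      rw [PySem.Chars.join_cons_cons]
      simp only [List.length_append, List.map_cons, List.sum_cons, List.length_cons]
      rw [ih (by simp)]
      simp only [List.map_cons, List.sum_cons, List.length_cons, Nat.add_sub_cancel]
      rw [Nat.mul_succ]
      ring

theorem pv_len_join (l : List String) (h : l ≠ []) :
    PySem.Str.len (pvJoin l) = (l.map PySem.Str.len).sum + 7 * ((l.length : Int) - 1) := by
  have h0 : (pvJoin l).toList = PySem.Chars.join (" <new> ".toList) (l.map String.toList) := by
    simp [pvJoin, PySem.Str.join, String.toList_ofList]
  rw [PySem.Str.len_eq, h0, pv_cjoin_len _ _ (by simpa using h)]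
  have hsep : (" <new> ".toList).length = 7 := by decide
  rw [hsep]
  have hmap : (l.map PySem.Str.len).sum = (((l.map String.toList).map List.length).sum : Int) := by
    rw [Nat.cast_list_sum, List.map_map, List.map_map]
    exact congrArg List.sum (List.map_congr_left (fun s _ => PySem.Str.len_eq s))
  rw [hmap]
  have hl : 1 ≤ l.length := by cases l with | nil => exact absurd rfl h | cons a b => simp
  simp only [List.length_map]
  omega


-- appending one more text to a nonempty join
theorem pv_cjoin_append (sep : List Char) : ∀ (ps : List (List Char)) (x : List Char), ps ≠ [] →
    PySem.Chars.join sep (ps ++ [x]) = PySem.Chars.join sep ps ++ sep ++ x := by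
  intro ps
  induction ps with
  | nil => intro x h; exact absurd rfl h
  | cons p ps ih =>
    intro x _
    cases ps with
    | nil => simp [PySem.Chars.join_cons_cons, PySem.Chars.join_singleton]
    | cons p' rest =>
      have h1 : (p :: p' :: rest) ++ [x] = p :: p' :: (rest ++ [x]) := by simp
      rw [h1, PySem.Chars.join_cons_cons, PySem.Chars.join_cons_cons]
      rw [show p' :: (rest ++ [x]) = (p' :: rest) ++ [x] from by simp]
      rw [ih x (by simp)]
      simp [List.append_assoc]

theorem pv_join_append (l : List String) (t : String) (h : l ≠ []) :
    pvJoin (l ++ [t]) = pvJoin l ++ " <new> " ++ t := by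
  apply String.toList_inj.mp
  show (PySem.Str.join " <new> " (l ++ [t])).toList = _
  simp only [PySem.Str.join, String.toList_ofList, String.toList_append, List.map_append, List.map_cons, List.map_nil]
  rw [pv_cjoin_append _ _ _ (by simpa using h)]
  simp [pvJoin, PySem.Str.join, String.toList_ofList]


theorem pv_join_singleton (t : String) : pvJoin [t] = t := by
  simp [pvJoin, PySem.Str.join, PySem.Chars.join_singleton, String.ofList_toList]


-- length of a segment in terms of the prefix sums
theorem pv_len_seg (texts : List String) (a b : Nat) (hab : a < b) (hb : b ≤ texts.length) :
    PySem.Str.len (pvSeg texts a b)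
      = pvS (texts.map PySem.Str.len) b - pvS (texts.map PySem.Str.len) a - 7 := by
  have hlenl : ((texts.drop a).take (b - a)).length = b - a := by
    simp [List.length_take, List.length_drop]
    omega
  have hne : (texts.drop a).take (b - a) ≠ [] := by
    intro hc
    rw [hc] at hlenl
    simp at hlenl
    omega
  unfold pvSeg
  rw [pv_len_join _ hne, hlenl]
  have hmap : ((texts.drop a).take (b - a)).map PySem.Str.len
      = ((texts.map PySem.Str.len).drop a).take (b - a) := by
    rw [List.map_take, List.map_drop]
  have hsplit : (texts.map PySem.Str.len).take b
      = (texts.map PySem.Str.len).take a ++ ((texts.map PySem.Str.len).drop a).take (b - a) := by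
    rw [← List.take_add]
    congr 1
    omega
  rw [hmap]
  unfold pvS
  rw [hsplit, List.sum_append]
  have hcast : ((b - a : Nat) : Int) = (b : Int) - (a : Int) := by omega
  rw [hcast]
  ring


theorem pvS_mono (lens : List Int) (hnn : ∀ x ∈ lens, 0 ≤ x) (i j : Nat) (hij : i ≤ j)
    (hj : j ≤ lens.length) : pvS lens i ≤ pvS lens j := by
  have hsplit : lens.take j = lens.take i ++ (lens.drop i).take (j - i) := by
    rw [← List.take_add]
    congr 1
    omega
  have hpos : 0 ≤ ((lens.drop i).take (j - i)).sum :=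
    List.sum_nonneg (fun x hx => hnn x (List.mem_of_mem_drop (List.mem_of_mem_take hx)))
  unfold pvS
  rw [hsplit, List.sum_append]
  have : (i : Int) ≤ (j : Int) := by exact_mod_cast hij
  linarith


-- ---- A = linear segmentation ----
theorem pv_seg_singleton (texts : List String) (k : Nat) (hk : k < texts.length) :
    pvSeg texts k (k + 1) = texts[k] := by
  unfold pvSeg
  rw [List.drop_eq_getElem_cons hk]
  have h1 : k + 1 - k = 1 := by omega
  rw [h1, show (1 : Nat) = 0 + 1 from rfl, List.take_succ_cons, List.take_zero]
  exact pv_join_singleton _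

theorem pv_seg_extend (texts : List String) (a k : Nat) (ha : a < k) (hk : k < texts.length) :
    pvSeg texts a k ++ " <new> " ++ texts[k] = pvSeg texts a (k + 1) := by
  have hlist : (texts.drop a).take (k - a) ++ [texts[k]] = (texts.drop a).take (k + 1 - a) := by
    have h1 : k + 1 - a = (k - a) + 1 := by omega
    rw [h1, List.take_succ]
    have h2 : (texts.drop a)[k - a]? = some texts[k] := by
      rw [List.getElem?_drop]
      have h3 : a + (k - a) = k := by omega
      rw [h3, List.getElem?_eq_getElem hk]
    rw [h2]
    rfl
  have hne : (texts.drop a).take (k - a) ≠ [] := by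
    intro hc
    have := congrArg List.length hc
    simp [List.length_take, List.length_drop] at this
    omega
  unfold pvSeg
  rw [← hlist, pv_join_append _ _ hne]

theorem pv_emit_eq_segsL (mct uct : Int) (tr : Bool) (docs : List PvDoc) :
    ∀ (m k a0 : Nat) (st : Option PvDoc), k + m = docs.length → a0 ≤ k →
    (match st with
     | none => a0 = k
     | some nd => a0 < k ∧ pvGetS nd "text" = pvSeg (docs.map pvTextOf) a0 k ∧
         ∀ t, pvSetText nd t = pvSetText (docs.getD a0 []) t) →
    pvEmit mct uct tr st (docs.drop k)
      = (pvSegsL (docs.map (fun d => PySem.Str.len (pvTextOf d))) mct a0 k).flatMap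
          (pvF mct uct tr docs) := by
  have hl : docs.map (fun d => PySem.Str.len (pvTextOf d)) = (docs.map pvTextOf).map PySem.Str.len := by
    rw [List.map_map]
    rfl
  have hlenlens : ((docs.map pvTextOf).map PySem.Str.len).length = docs.length := by simp
  have hlentexts : (docs.map pvTextOf).length = docs.length := by simp
  intro m
  induction m with
  | zero =>
    intro k a0 st hm hak hst
    have hkd : k = docs.length := by omega
    rw [hkd, List.drop_length, hl, pvSegsL, dif_neg (by omega)]
    cases st <;> simp [pvEmit]
  | succ m ih =>
    intro k a0 st hm hak hst
    have hk : k < docs.length := by omega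
    have hdrop : docs.drop k = docs[k] :: docs.drop (k + 1) := List.drop_eq_getElem_cons hk
    have htk : pvGetS docs[k] "text" = (docs.map pvTextOf)[k]'(by omega) := by
      rw [List.getElem_map]
      rfl
    rw [hdrop, hl]
    cases st with
    | none =>
      have ha0 : a0 = k := hst
      subst ha0
      have hseg1 : pvSeg (docs.map pvTextOf) a0 (a0 + 1) = pvGetS docs[a0] "text" := by
        rw [pv_seg_singleton _ a0 (by omega), ← htk]
      have hcond : (mct ≤ PySem.Str.len (pvGetS docs[a0] "text"))
          ↔ mct + pvS ((docs.map pvTextOf).map PySem.Str.len) a0 + 7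
              ≤ pvS ((docs.map pvTextOf).map PySem.Str.len) (a0 + 1) := by
        rw [← hseg1, pv_len_seg _ a0 (a0 + 1) (by omega) (by omega)]
        omega
      rw [pvSegsL, dif_pos (by omega)]
      by_cases hc : mct ≤ PySem.Str.len (pvGetS docs[a0] "text")
      · have hc' := hcond.mp hc
        simp only [pvEmit, if_pos hc]
        rw [if_pos hc', List.flatMap_cons]
        congr 1
        · show pvChunks mct uct tr docs[a0] (pvGetS docs[a0] "text") = pvF mct uct tr docs (a0, a0 + 1)
          unfold pvF
          rw [hseg1, List.getD_eq_getElem docs [] (by omega)]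
        · rw [← hl]
          exact ih (a0 + 1) (a0 + 1) none (by omega) le_rfl rfl
      · have hc' := (not_iff_not.mpr hcond).mp hc
        simp only [pvEmit, if_neg hc]
        rw [if_neg hc', ← hl]
        refine ih (a0 + 1) a0 (some docs[a0]) (by omega) (by omega) ?_
        refine ⟨by omega, hseg1.symm, ?_⟩
        intro t
        rw [List.getD_eq_getElem docs [] (by omega)]
    | some nd =>
      obtain ⟨ha0k, hacc, hset⟩ := hst
      have hget' : pvGetS (pvSetText nd (pvGetS nd "text" ++ " <new> " ++ pvGetS docs[k] "text")) "text"
          = pvSeg (docs.map pvTextOf) a0 (k + 1) := by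
        rw [pv_get_set, hacc, htk]
        exact pv_seg_extend _ a0 k ha0k (by omega)
      have hcond : (mct ≤ PySem.Str.len (pvGetS (pvSetText nd (pvGetS nd "text" ++ " <new> " ++ pvGetS docs[k] "text")) "text"))
          ↔ mct + pvS ((docs.map pvTextOf).map PySem.Str.len) a0 + 7
              ≤ pvS ((docs.map pvTextOf).map PySem.Str.len) (k + 1) := by
        rw [hget', pv_len_seg _ a0 (k + 1) (by omega) (by omega)]
        omega
      rw [pvSegsL, dif_pos (by omega)]
      by_cases hc : mct ≤ PySem.Str.len (pvGetS (pvSetText nd (pvGetS nd "text" ++ " <new> " ++ pvGetS docs[k] "text")) "text")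
      · have hc' := hcond.mp hc
        simp only [pvEmit, if_pos hc]
        rw [if_pos hc', List.flatMap_cons]
        congr 1
        · rw [pv_chunks_congr mct uct tr _ (docs.getD a0 []) _
            (fun t => by rw [pv_set_set]; exact hset t)]
          unfold pvF
          rw [hget']
        · rw [← hl]
          exact ih (k + 1) (k + 1) none (by omega) le_rfl rfl
      · have hc' := (not_iff_not.mpr hcond).mp hc
        simp only [pvEmit, if_neg hc]
        rw [if_neg hc', ← hl]
        refine ih (k + 1) a0 (some _) (by omega) (by omega) ?_
        exact ⟨by omega, hget', fun t => by rw [pv_set_set]; exact hset t⟩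


-- ---- binary search invariant ----
theorem pvFirstGeqAux_ge (q : List Int) (t : Int) :
    ∀ (f lo hi : Nat), lo ≤ pvFirstGeqAux q t f lo hi := by
  intro f
  induction f with
  | zero => intro lo hi; exact le_rfl
  | succ f ih =>
    intro lo hi
    show lo ≤ (if lo < hi then
        if PySem.List.pyGetD q (((lo + hi) / 2 : Nat) : Int) 0 < t then
          pvFirstGeqAux q t f ((lo + hi) / 2 + 1) hi
        else pvFirstGeqAux q t f lo ((lo + hi) / 2)
      else lo)
    split
    · split
      · have := ih ((lo + hi) / 2 + 1) hi
        omega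
      · exact ih lo ((lo + hi) / 2)
    · exact le_rfl

theorem pvFirstGeq_ge (q : List Int) (t : Int) (lo hi : Nat) :
    lo ≤ pvFirstGeq q t lo hi :=
  pvFirstGeqAux_ge q t (hi - lo) lo hi

theorem pv_firstGeqAux_inv (q : List Int) (t : Int) :
    ∀ (k lo hi : Nat), hi - lo ≤ k → lo ≤ hi →
    pvFirstGeqAux q t k lo hi ≤ hi ∧
    (pvFirstGeqAux q t k lo hi < hi → t ≤ PySem.List.pyGetD q ((pvFirstGeqAux q t k lo hi : Nat) : Int) 0) ∧
    (lo < pvFirstGeqAux q t k lo hi → PySem.List.pyGetD q (((pvFirstGeqAux q t k lo hi - 1 : Nat) : Int)) 0 < t) := by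
  intro k
  induction k with
  | zero =>
    intro lo hi hk hle
    exact ⟨hle, by simp [pvFirstGeqAux]; omega, by simp [pvFirstGeqAux]⟩
  | succ k ih =>
    intro lo hi hk hle
    rw [show pvFirstGeqAux q t (k + 1) lo hi = (if lo < hi then
        if PySem.List.pyGetD q (((lo + hi) / 2 : Nat) : Int) 0 < t then
          pvFirstGeqAux q t k ((lo + hi) / 2 + 1) hi
        else pvFirstGeqAux q t k lo ((lo + hi) / 2)
      else lo) from rfl]
    by_cases h : lo < hi
    · rw [if_pos h]
      by_cases hc : PySem.List.pyGetD q (((lo + hi) / 2 : Nat) : Int) 0 < t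
      · rw [if_pos hc]
        have hge := pvFirstGeqAux_ge q t k ((lo + hi) / 2 + 1) hi
        obtain ⟨h1, h2, h3⟩ := ih ((lo + hi) / 2 + 1) hi (by omega) (by omega)
        refine ⟨h1, h2, ?_⟩
        intro _
        by_cases heq : (lo + hi) / 2 + 1 < pvFirstGeqAux q t k ((lo + hi) / 2 + 1) hi
        · exact h3 heq
        · have : pvFirstGeqAux q t k ((lo + hi) / 2 + 1) hi = (lo + hi) / 2 + 1 := by omega
          rw [this]
          simpa using hc
      · rw [if_neg hc]
        have hge := pvFirstGeqAux_ge q t k lo ((lo + hi) / 2)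
        obtain ⟨h1, h2, h3⟩ := ih lo ((lo + hi) / 2) (by omega) (by omega)
        refine ⟨by omega, ?_, h3⟩
        intro _
        by_cases heq : pvFirstGeqAux q t k lo ((lo + hi) / 2) < (lo + hi) / 2
        · exact h2 heq
        · have : pvFirstGeqAux q t k lo ((lo + hi) / 2) = (lo + hi) / 2 := by omega
          rw [this]
          exact not_lt.mp hc
    · rw [if_neg h]
      exact ⟨hle, by omega, by omega⟩

theorem pv_firstGeq_inv (q : List Int) (t : Int) :
    ∀ (k lo hi : Nat), hi - lo ≤ k → lo ≤ hi →
    pvFirstGeq q t lo hi ≤ hi ∧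
    (pvFirstGeq q t lo hi < hi → t ≤ PySem.List.pyGetD q ((pvFirstGeq q t lo hi : Nat) : Int) 0) ∧
    (lo < pvFirstGeq q t lo hi → PySem.List.pyGetD q (((pvFirstGeq q t lo hi - 1 : Nat) : Int)) 0 < t) :=
  fun _ lo hi _ hle => pv_firstGeqAux_inv q t (hi - lo) lo hi le_rfl hle

-- the cut loop's fuel is irrelevant once it covers the remaining span, giving the one-step unfolding
theorem pvCutsAux_irrel (q : List Int) (mct : Int) (n : Nat) :
    ∀ (f g a : Nat), n - a ≤ f → n - a ≤ g → pvCutsAux q mct n f a = pvCutsAux q mct n g a := by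
  intro f
  induction f with
  | zero =>
    intro g a hf hg
    cases g with
    | zero => rfl
    | succ g =>
      show pvCutsAux q mct n 0 a = (if a < n then _ else [])
      rw [if_neg (by omega)]
      rfl
  | succ f ih =>
    intro g a hf hg
    cases g with
    | zero =>
      show (if a < n then _ else []) = pvCutsAux q mct n 0 a
      rw [if_neg (by omega)]
      rfl
    | succ g =>
      show (if a < n then
          if pvFirstGeq q (PySem.List.pyGetD q (a : Int) 0 + 7 + mct) (a + 1) q.length ≤ n then
            (a, pvFirstGeq q (PySem.List.pyGetD q (a : Int) 0 + 7 + mct) (a + 1) q.length) ::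
              pvCutsAux q mct n f (pvFirstGeq q (PySem.List.pyGetD q (a : Int) 0 + 7 + mct) (a + 1) q.length)
          else []
        else []) = (if a < n then
          if pvFirstGeq q (PySem.List.pyGetD q (a : Int) 0 + 7 + mct) (a + 1) q.length ≤ n then
            (a, pvFirstGeq q (PySem.List.pyGetD q (a : Int) 0 + 7 + mct) (a + 1) q.length) ::
              pvCutsAux q mct n g (pvFirstGeq q (PySem.List.pyGetD q (a : Int) 0 + 7 + mct) (a + 1) q.length)
          else []
        else [])
      by_cases ha : a < n
      · rw [if_pos ha, if_pos ha]
        by_cases hb : pvFirstGeq q (PySem.List.pyGetD q (a : Int) 0 + 7 + mct) (a + 1) q.length ≤ n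
        · rw [if_pos hb, if_pos hb]
          have hgeb := pvFirstGeq_ge q (PySem.List.pyGetD q (a : Int) 0 + 7 + mct) (a + 1) q.length
          rw [ih g _ (by omega) (by omega)]
        · rw [if_neg hb, if_neg hb]
      · rw [if_neg ha, if_neg ha]

theorem pvCutsB_unfold (q : List Int) (mct : Int) (n a : Nat) :
    pvCutsB q mct n a = (if a < n then
        if pvFirstGeq q (PySem.List.pyGetD q (a : Int) 0 + 7 + mct) (a + 1) q.length ≤ n then
          (a, pvFirstGeq q (PySem.List.pyGetD q (a : Int) 0 + 7 + mct) (a + 1) q.length) ::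
            pvCutsB q mct n (pvFirstGeq q (PySem.List.pyGetD q (a : Int) 0 + 7 + mct) (a + 1) q.length)
        else []
      else []) := by
  unfold pvCutsB
  cases hna : n - a with
  | zero =>
    show pvCutsAux q mct n 0 a = _
    rw [if_neg (by omega)]
    rfl
  | succ f =>
    show (if a < n then _ else []) = _
    by_cases ha : a < n
    · rw [if_pos ha, if_pos ha]
      by_cases hb : pvFirstGeq q (PySem.List.pyGetD q (a : Int) 0 + 7 + mct) (a + 1) q.length ≤ n
      · rw [if_pos hb, if_pos hb]
        have hgeb := pvFirstGeq_ge q (PySem.List.pyGetD q (a : Int) 0 + 7 + mct) (a + 1) q.length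
        rw [pvCutsAux_irrel q mct n f _ _ (by omega) le_rfl]
      · rw [if_neg hb, if_neg hb]
    · rw [if_neg ha, if_neg ha]

-- ---- the prefix-sum list built by B's loop ----
def pvScan (x : Int) : List Int → List Int
  | [] => []
  | L :: ls => (x + L + 7) :: pvScan (x + L + 7) ls

theorem pv_prefix_fold (ls : List Int) :
    ∀ (ys : List Int) (x : Int),
    ls.foldl (fun q L => q ++ [PySem.List.pyGetD q (-1) 0 + L + 7]) (ys ++ [x])
      = ys ++ [x] ++ pvScan x ls := by
  induction ls with
  | nil => intro ys x; simp [pvScan]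
  | cons L ls ih =>
    intro ys x
    rw [List.foldl_cons]
    rw [PySem.List.pyGetD_neg_one_append_singleton]
    rw [show (ys ++ [x]) ++ [x + L + 7] = (ys ++ [x]) ++ [x + L + 7] from rfl]
    rw [ih (ys ++ [x]) (x + L + 7)]
    simp [pvScan]


theorem pvScan_length (ls : List Int) : ∀ x, (pvScan x ls).length = ls.length := by
  induction ls with
  | nil => intro x; rfl
  | cons L ls ih => intro x; simp [pvScan, ih]


theorem pvScan_getD (ls : List Int) : ∀ (x : Int) (i : Nat), i < ls.length →
    (pvScan x ls).getD i 0 = x + (ls.take (i + 1)).sum + 7 * ((i : Int) + 1) := by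
  induction ls with
  | nil => intro x i h; simp at h
  | cons L ls ih =>
    intro x i h
    cases i with
    | zero => simp [pvScan]
    | succ i =>
      rw [show pvScan x (L :: ls) = (x + L + 7) :: pvScan (x + L + 7) ls from rfl]
      rw [List.getD_cons_succ]
      rw [ih (x + L + 7) i (by simpa using h)]
      simp [List.take_succ_cons]
      ring


-- ---- binary-search cut points = linear segmentation ----
-- greedy scanning from k (no completion in (a, k]) reaches exactly the minimal completion point b
theorem pv_segsL_skip (lens : List Int) (mct : Int) (a b : Nat)
    (hb1 : a + 1 ≤ b) (hb2 : b ≤ lens.length + 1)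
    (hgb : b ≤ lens.length → mct + pvS lens a + 7 ≤ pvS lens b)
    (hlow : ∀ i, a + 1 ≤ i → i < b → pvS lens i < mct + pvS lens a + 7) :
    ∀ (m k : Nat), a ≤ k → k ≤ lens.length → lens.length - k ≤ m →
    (∀ j, a < j → j ≤ k → pvS lens j < mct + pvS lens a + 7) →
    pvSegsL lens mct a k = if b ≤ lens.length then (a, b) :: pvSegsL lens mct b b else [] := by
  intro m
  induction m with
  | zero =>
    intro k hak hkn hm hscan
    have hkn' : k = lens.length := by omega
    rw [pvSegsL, dif_neg (by omega)]
    by_cases hbn : b ≤ lens.length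
    · exact absurd (hgb hbn) (by have := hscan b (by omega) (by omega); omega)
    · rw [if_neg hbn]
  | succ m ih =>
    intro k hak hkn hm hscan
    by_cases hk : k < lens.length
    · rw [pvSegsL, dif_pos hk]
      by_cases hc : mct + pvS lens a + 7 ≤ pvS lens (k + 1)
      · rw [if_pos hc]
        have hbk : b = k + 1 := by
          by_contra hne
          rcases Nat.lt_or_ge (k + 1) b with hgt | hle
          · have := hlow (k + 1) (by omega) hgt
            omega
          · have hble : b ≤ k := by omega
            have h1 := hscan b (by omega) hble
            have h2 := hgb (by omega)
            omega
        subst hbk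
        rw [if_pos (by omega)]
      · rw [if_neg hc]
        apply ih (k + 1) (by omega) (by omega) (by omega)
        intro j hj1 hj2
        rcases Nat.lt_or_ge j (k + 1) with hlt | hge
        · exact hscan j hj1 (by omega)
        · have : j = k + 1 := by omega
          subst this
          omega
    · rw [pvSegsL, dif_neg (by omega)]
      by_cases hbn : b ≤ lens.length
      · exact absurd (hgb hbn) (by have := hscan b (by omega) (by omega); omega)
      · rw [if_neg hbn]

theorem pv_cuts_eq_segsL (lens : List Int) (mct : Int) (q : List Int)
    (hlen : q.length = lens.length + 1)
    (hq : ∀ i : Nat, i ≤ lens.length → q.getD i 0 = pvS lens i)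
    (hnn : ∀ x ∈ lens, 0 ≤ x) :
    ∀ (m a : Nat), lens.length - a ≤ m →
    pvCutsB q mct lens.length a = pvSegsL lens mct a a := by
  intro m
  induction m with
  | zero =>
    intro a hm
    rw [pvCutsB_unfold, if_neg (by omega), pvSegsL, dif_neg (by omega)]
  | succ m ih =>
    intro a hm
    by_cases ha : a < lens.length
    · rw [pvCutsB_unfold, if_pos ha]
      have hqa : PySem.List.pyGetD q (a : Int) 0 = pvS lens a := by
        rw [PySem.List.pyGetD_natCast]
        exact hq a (by omega)
      set t := PySem.List.pyGetD q (a : Int) 0 + 7 + mct with ht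
      set b := pvFirstGeq q t (a + 1) q.length with hbdef
      have hge : a + 1 ≤ b := pvFirstGeq_ge q t (a + 1) q.length
      obtain ⟨h1, h2, h3⟩ := pv_firstGeq_inv q t (q.length - (a + 1)) (a + 1) q.length le_rfl (by omega)
      rw [← hbdef] at h1 h2 h3
      have hgb : b ≤ lens.length → mct + pvS lens a + 7 ≤ pvS lens b := by
        intro hbn
        have := h2 (by omega)
        rw [PySem.List.pyGetD_natCast, hq b hbn] at this
        omega
      have hlow : ∀ i, a + 1 ≤ i → i < b → pvS lens i < mct + pvS lens a + 7 := by
        intro i hi1 hi2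
        have hb1 : a + 1 < b := by omega
        have := h3 (by omega)
        rw [PySem.List.pyGetD_natCast, hq (b - 1) (by omega)] at this
        have hmono := pvS_mono lens hnn i (b - 1) (by omega) (by omega)
        omega
      have hskip := pv_segsL_skip lens mct a b hge (by omega) hgb hlow lens.length a
        le_rfl (by omega) (by omega) (fun j hj1 hj2 => by omega)
      rw [hskip]
      by_cases hbn : b ≤ lens.length
      · rw [if_pos hbn, if_pos hbn]
        rw [ih b (by omega)]
      · rw [if_neg hbn, if_neg hbn]
    · rw [pvCutsB_unfold, if_neg (by omega), pvSegsL, dif_neg (by omega)]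


-- ---- B side: the port's folds compute the same flatMap ----
theorem pv_chunkfold_B (mct uct : Int) (tr : Bool) (group : List PvDoc) :
    ∀ (cuts : List (Nat × Nat)) (out : List PvDoc),
    cuts.foldl
      (fun (out : List PvDoc) ab =>
        let text := PySem.Str.join " <new> " (PySem.List.slice (group.map (fun d => pvGetS d "text")) (some (ab.1 : Int)) (some (ab.2 : Int)))
        let n_chunks : Int := if tr then max (PySem.Int.floordiv (PySem.Str.len text) uct) 1 else 1
        (PySem.List.pyRange 0 n_chunks 1).foldl
          (fun (out : List PvDoc) i =>
            let chunk := PySem.Str.slice text (some (uct * i)) (some (uct * (i + 1)))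
            if mct ≤ PySem.Str.len chunk then
              out ++ [pvSetText (PySem.List.pyGetD group (ab.1 : Int) []) chunk]
            else out)
          out)
      out
    = out ++ cuts.flatMap (pvF mct uct tr group) := by
  have hfun : (fun (out : List PvDoc) (ab : Nat × Nat) =>
        let text := PySem.Str.join " <new> " (PySem.List.slice (group.map (fun d => pvGetS d "text")) (some (ab.1 : Int)) (some (ab.2 : Int)))
        let n_chunks : Int := if tr then max (PySem.Int.floordiv (PySem.Str.len text) uct) 1 else 1
        (PySem.List.pyRange 0 n_chunks 1).foldl
          (fun (out : List PvDoc) i =>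
            let chunk := PySem.Str.slice text (some (uct * i)) (some (uct * (i + 1)))
            if mct ≤ PySem.Str.len chunk then
              out ++ [pvSetText (PySem.List.pyGetD group (ab.1 : Int) []) chunk]
            else out)
          out)
      = fun (out : List PvDoc) ab => out ++ pvF mct uct tr group ab := by
    funext out ab
    have htext : PySem.Str.join " <new> " (PySem.List.slice (group.map (fun d => pvGetS d "text")) (some (ab.1 : Int)) (some (ab.2 : Int)))
        = pvSeg (group.map pvTextOf) ab.1 ab.2 := by
      rw [PySem.List.slice_natCast]
      rfl
    simp only [htext, PySem.List.pyGetD_natCast]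
    rw [PySem.List.foldl_append_ite
      (fun i => mct ≤ PySem.Str.len (PySem.Str.slice (pvSeg (group.map pvTextOf) ab.1 ab.2) (some (uct * i)) (some (uct * (i + 1)))))
      (fun i => pvSetText (group.getD ab.1 []) (PySem.Str.slice (pvSeg (group.map pvTextOf) ab.1 ab.2) (some (uct * i)) (some (uct * (i + 1)))))]
    rfl
  intro cuts out
  rw [hfun, PySem.List.foldl_append_eq_flatMap]

-- ---- dict scaffolding for the outer loop ----
theorem pv_oflist_nodup (l : List (String × List PvDoc)) (h : (l.map Prod.fst).Nodup) :
    PySem.Dict.ofList l = PySem.Dict.mk l := by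
  apply PySem.Dict.ext
  show (PySem.Dict.empty.update l).items = l
  unfold PySem.Dict.update
  have := PySem.Dict.items_foldl_insert_fresh l Prod.fst Prod.snd PySem.Dict.empty
    (fun a _ => rfl) (by simpa using h)
  simpa using this

theorem pv_outer_fold {α : Type} (step : PvAD → (String × α) → PvAD) (F : String × α → List PvDoc)
    (hstep : ∀ (p : String × α) (pre post : List (String × List PvDoc)),
      p.1 ∉ pre.map Prod.fst → p.1 ∉ post.map Prod.fst →
      step (PySem.Dict.mk (pre ++ (p.1, []) :: post)) p = PySem.Dict.mk (pre ++ (p.1, F p) :: post)) :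
    ∀ (l : List (String × α)) (pre : List (String × List PvDoc)),
    (l.map Prod.fst).Nodup → (∀ p ∈ l, p.1 ∉ pre.map Prod.fst) →
    (l.foldl step (PySem.Dict.mk (pre ++ l.map (fun p => (p.1, ([] : List PvDoc)))))).items
      = pre ++ l.map (fun p => (p.1, F p)) := by
  intro l
  induction l with
  | nil => intro pre _ _; simp
  | cons p l ih =>
    intro pre hnd hpre
    have hnd' : (l.map Prod.fst).Nodup := by simpa using hnd.of_cons
    have hhd : p.1 ∉ l.map Prod.fst := by
      have := hnd
      simp only [List.map_cons, List.nodup_cons] at this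
      exact this.1
    rw [List.map_cons, List.foldl_cons]
    have hpost : p.1 ∉ (l.map (fun p => (p.1, ([] : List PvDoc)))).map Prod.fst := by
      simpa using hhd
    rw [hstep p pre _ (hpre p (by simp)) hpost]
    rw [List.append_cons]
    have := ih (pre ++ [(p.1, F p)]) hnd' (by
      intro q hq
      simp only [List.map_append, List.map_cons, List.map_nil, List.mem_append, List.mem_cons]
      rintro (hq1 | hq2)
      · exact hpre q (List.mem_cons_of_mem _ hq) hq1
      · have : q.1 = p.1 := by simpa using hq2
        exact hhd (this ▸ List.mem_map_of_mem hq))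
    rw [this, List.append_cons, List.append_assoc]
    simp

theorem pv_outer_fold' {α : Type} (step : PvAD → (String × α) → PvAD) (F : String × α → List PvDoc)
    (hstep : ∀ (p : String × α) (pre post : List (String × List PvDoc)),
      p.1 ∉ pre.map Prod.fst → p.1 ∉ post.map Prod.fst →
      step (PySem.Dict.mk (pre ++ (p.1, []) :: post)) p = PySem.Dict.mk (pre ++ (p.1, F p) :: post))
    (l : List (String × α)) (hnd : (l.map Prod.fst).Nodup) :
    (l.foldl step (PySem.Dict.mk (l.map (fun p => (p.1, ([] : List PvDoc)))))).items
      = l.map (fun p => (p.1, F p)) := by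
  have := pv_outer_fold step F hstep l [] hnd (by simp)
  simpa using this

-- one sorted genre group: A's pvEmit equals B's cuts-then-chunks
theorem pv_group_eq (mct uct : Int) (tr : Bool) (group : List PvDoc) :
    pvEmit mct uct tr none group
      = (pvCutsB (((group.map (fun d => pvGetS d "text")).map (fun t => PySem.Str.len t)).foldl
            (fun q L => q ++ [PySem.List.pyGetD q (-1) 0 + L + 7]) [(0 : Int)])
          mct (group.map (fun d => pvGetS d "text")).length 0).flatMap (pvF mct uct tr group) := by
  set texts := group.map (fun d => pvGetS d "text") with htexts
  set lens := texts.map (fun t => PySem.Str.len t) with hlensdef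
  have hq0 : lens.foldl (fun q L => q ++ [PySem.List.pyGetD q (-1) 0 + L + 7]) [(0 : Int)]
      = (0 : Int) :: pvScan 0 lens := by
    have := pv_prefix_fold lens [] 0
    simpa using this
  rw [hq0]
  have hlen : ((0 : Int) :: pvScan 0 lens).length = lens.length + 1 := by
    simp [pvScan_length]
  have hq : ∀ i : Nat, i ≤ lens.length → ((0 : Int) :: pvScan 0 lens).getD i 0 = pvS lens i := by
    intro i hi
    cases i with
    | zero => simp [pvS]
    | succ i =>
      rw [List.getD_cons_succ, pvScan_getD lens 0 i (by omega)]
      unfold pvS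
      push_cast
      ring
  have hnn : ∀ x ∈ lens, 0 ≤ x := by
    intro x hx
    rw [hlensdef] at hx
    simp only [List.mem_map] at hx
    obtain ⟨t, -, rfl⟩ := hx
    exact pv_len_nonneg t
  have htl : texts.length = lens.length := by simp [hlensdef]
  rw [htl, pv_cuts_eq_segsL lens mct _ hlen hq hnn lens.length 0 (by omega)]
  have hemit := pv_emit_eq_segsL mct uct tr group group.length 0 0 none (by omega) le_rfl rfl
  rw [List.drop_zero] at hemit
  rw [hemit]
  have hlens2 : group.map (fun d => PySem.Str.len (pvTextOf d)) = lens := by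
    rw [hlensdef, htexts, List.map_map]
    rfl
  rw [hlens2]



-- ===== VERDICT (by name: the statement is the Claim_ definition above) =====
theorem stack_documents_spec : Claim_equal_stack_documents := by
  intro authors mct uct tr _ hpre
  obtain ⟨hnodup, -, -⟩ := hpre
  unfold Spec_stack_documents
  show stack_documents authors mct uct tr = stack_documents_alt authors mct uct tr
  have hkeys : ((authors.map (fun p => (p.1, ([] : List PvDoc)))).map Prod.fst).Nodup := by
    simpa [List.map_map, Function.comp] using hnodup
  have HA : (authors.foldl
      (fun (na : PvAD) p =>
        let articles := p.2.filter (fun doc => pvGetS doc "genre" == "Article")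
        let tweets := p.2.filter (fun doc => pvGetS doc "genre" == "Tweet")
        [articles, tweets].foldl
          (fun (na : PvAD) docs0 =>
            let docs := PySem.List.sorted docs0 (fun x => PySem.Str.len (pvGetS x "text")) true
            (docs.foldl (pvStepDocA mct uct tr p.1) ((none : Option PvDoc), na)).2)
          na)
      (PySem.Dict.mk (authors.map (fun p => (p.1, ([] : List PvDoc)))))).items
    = authors.map (fun p => (p.1,
        pvEmit mct uct tr none (PySem.List.sorted (p.2.filter (fun doc => pvGetS doc "genre" == "Article")) (fun x => PySem.Str.len (pvGetS x "text")) true)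
        ++ pvEmit mct uct tr none (PySem.List.sorted (p.2.filter (fun doc => pvGetS doc "genre" == "Tweet")) (fun x => PySem.Str.len (pvGetS x "text")) true))) := by
    apply pv_outer_fold'
    · intro p pre post hp1 hp2
      simp only [List.foldl_cons, List.foldl_nil]
      rw [pv_groupfold_A mct uct tr p.1 pre post hp1 hp2]
      rw [pv_groupfold_A mct uct tr p.1 pre post hp1 hp2]
      simp
    · exact hnodup
  have HB : (authors.foldl
      (fun (na : PvAD) p =>
        let out := ["Article", "Tweet"].foldl
          (fun (out : List PvDoc) genre =>
            let group := PySem.List.sorted (p.2.filter (fun d => pvGetS d "genre" == genre))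
              (fun d => PySem.Str.len (pvGetS d "text")) true
            let texts := group.map (fun d => pvGetS d "text")
            let lens := texts.map (fun t => PySem.Str.len t)
            let q := lens.foldl (fun q L => q ++ [PySem.List.pyGetD q (-1) 0 + L + 7]) [(0 : Int)]
            (pvCutsB q mct texts.length 0).foldl
              (fun (out : List PvDoc) ab =>
                let text := PySem.Str.join " <new> " (PySem.List.slice texts (some (ab.1 : Int)) (some (ab.2 : Int)))
                let n_chunks : Int := if tr then max (PySem.Int.floordiv (PySem.Str.len text) uct) 1 else 1
                (PySem.List.pyRange 0 n_chunks 1).foldl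
                  (fun (out : List PvDoc) i =>
                    let chunk := PySem.Str.slice text (some (uct * i)) (some (uct * (i + 1)))
                    if mct ≤ PySem.Str.len chunk then
                      out ++ [pvSetText (PySem.List.pyGetD group (ab.1 : Int) []) chunk]
                    else out)
                  out)
              out)
          []
        na.insert p.1 out)
      (PySem.Dict.mk (authors.map (fun p => (p.1, ([] : List PvDoc)))))).items
    = authors.map (fun p => (p.1,
        (pvCutsB ((((PySem.List.sorted (p.2.filter (fun d => pvGetS d "genre" == "Article")) (fun d => PySem.Str.len (pvGetS d "text")) true).map (fun d => pvGetS d "text")).map (fun t => PySem.Str.len t)).foldl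
            (fun q L => q ++ [PySem.List.pyGetD q (-1) 0 + L + 7]) [(0 : Int)])
          mct ((PySem.List.sorted (p.2.filter (fun d => pvGetS d "genre" == "Article")) (fun d => PySem.Str.len (pvGetS d "text")) true).map (fun d => pvGetS d "text")).length 0).flatMap
          (pvF mct uct tr (PySem.List.sorted (p.2.filter (fun d => pvGetS d "genre" == "Article")) (fun d => PySem.Str.len (pvGetS d "text")) true))
        ++ (pvCutsB ((((PySem.List.sorted (p.2.filter (fun d => pvGetS d "genre" == "Tweet")) (fun d => PySem.Str.len (pvGetS d "text")) true).map (fun d => pvGetS d "text")).map (fun t => PySem.Str.len t)).foldl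
            (fun q L => q ++ [PySem.List.pyGetD q (-1) 0 + L + 7]) [(0 : Int)])
          mct ((PySem.List.sorted (p.2.filter (fun d => pvGetS d "genre" == "Tweet")) (fun d => PySem.Str.len (pvGetS d "text")) true).map (fun d => pvGetS d "text")).length 0).flatMap
          (pvF mct uct tr (PySem.List.sorted (p.2.filter (fun d => pvGetS d "genre" == "Tweet")) (fun d => PySem.Str.len (pvGetS d "text")) true)))) := by
    apply pv_outer_fold'
    · intro p pre post hp1 hp2
      simp only [List.foldl_cons, List.foldl_nil]
      rw [pv_chunkfold_B, pv_chunkfold_B]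
      rw [pv_insert_middle pre post p.1 [] _ hp1 hp2]
      simp
    · exact hnodup
  unfold stack_documents stack_documents_alt
  rw [pv_oflist_nodup _ hkeys]
  rw [HA, HB]
  apply List.map_congr_left
  intro p _
  refine congrArg (Prod.mk p.1) ?_
  rw [← pv_group_eq mct uct tr, ← pv_group_eq mct uct tr]
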